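/- GENERATED by tools/from_farm_form.py from prooffarm-gif/accepted/DGifSetupDecompress.P/Proof.lean (a worked proof of the farm's unit `DGifSetupDecompress.P`,
   accepted by the verdict) — do not edit. -/
import Gif.Spec.Units.DGifSetupDecompress_P
import Gif.Spec.AllSegs

open X86 X86.User Asan ProgX.Base ProgX.Base.Spec Gif.Spec

set_option maxRecDepth 4000
set_option maxHeartbeats 4000000

/-!
  `DGifSetupDecompress.P` (0x106180 … 0x1061c8, 15 instructions; dgif_lib.c:813): the prologue of the protected function
  `DGifSetupDecompress`. Six pushes, `sub rsp, 72`, `rbx = gif`, the frame's three header words, the shadow index in `r13`,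
  the two inline poison stores. The recipe is that of farm.gif/worked/DGifGetWord.P (lemmas: Gif/Spec/FrameCarry.lean §1 – §3):
    1. the prelude and the walk to the cut behind the last inline shadow store;
    2. `name_stores2`: the memory before the shadow stores gets the name `M0`;
    3. about `M0` (a nest of STACK stores over `e.mem`): the footprint `hsame0`, the saved registers' slots;
    4. `after_prologue` (`HeapInv` with the own frame pushed, `GifOK`, `rem`), `prologue_same` (the footprint);
    5. the exit assertion `AfterP`, field by field.
-/

/-- The prologue of `DGifSetupDecompress` establishes `AfterP` at 0x1061c8 (`lea rdi, [rdi + 0x70]`, dgif_lib.c:817). -/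
theorem Gif.Spec.Proved.DGifSetupDecompress_P_ok : Gif.Spec.DGifSetupDecompress_P.Statement := by
  intro Lay hLay μ hμ u₀ hcode H rest frames F R e ret he hpre
  -- 1. THE PRELUDE: the entry's facts, the precondition
  have he0 := he
  v_entry he
  obtain ⟨henv, hrdi⟩ := hpre
  -- THE WALK, 0x106180 … 0x1061c8 (the cut behind the last inline shadow store)
  u_walk hcode [hμ.vendor] until [Gif.L.DGifSetupDecompress.at_1061c8] span [ProgX.Base.L.textLo, ProgX.Base.L.textHi] side (v_side)
  -- 2. NAMING THE MEMORY before the two inline shadow stores (0x1061b2, 0x1061bd)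
  have e120 : (e.reg .rsp - 120).toNat = (e.reg .rsp).toNat - 120 := by u_omega
  obtain ⟨M0, hM0, hmem⟩ := name_stores2 (e.reg .rsp - 120) 12582912 12582916 0 4 4059165169 4 4 4092850945
    w_mem (by omega) (by decide) (by decide) (by decide) (by decide)
  have hpro : Gif.Frames.DGifSetupDecompress.prologue = [⟨0, 4, 4059165169⟩, ⟨4, 4, 4092850945⟩] := rfl
  rw [← hpro, e120] at hmem
  -- 3. ABOUT `M0`: only stack stores over `e.mem` (six pushes, the frame's three header words)
  have hsame0 : Mem.SameExcept [⟨(e.reg .rsp).toNat - 304, (e.reg .rsp).toNat⟩] e.mem M0 := by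
    rw [hM0]
    u_same
  have k_r15 : M0.readLE (e.reg .rsp - 8) 8 = (e.reg .r15).toNat := by
    rw [hM0]
    u_read
  have k_r14 : M0.readLE (e.reg .rsp - 16) 8 = (e.reg .r14).toNat := by
    rw [hM0]
    u_read
  have k_r13 : M0.readLE (e.reg .rsp - 24) 8 = (e.reg .r13).toNat := by
    rw [hM0]
    u_read
  have k_r12 : M0.readLE (e.reg .rsp - 32) 8 = (e.reg .r12).toNat := by
    rw [hM0]
    u_read
  have k_rbp : M0.readLE (e.reg .rsp - 40) 8 = (e.reg .rbp).toNat := by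
    rw [hM0]
    u_read
  have k_rbx : M0.readLE (e.reg .rsp - 48) 8 = (e.reg .rbx).toNat := by
    rw [hM0]
    u_read
  clear hM0 w_mem
  -- 4. THE ENVIRONMENT behind the prologue: the heap's invariant with the own frame pushed, the state invariant, the reader
  obtain ⟨hinv1, hok1, hrem1⟩ := after_prologue (top := (e.reg .rsp).toNat) (top' := (e.reg .rsp).toNat - 120) (ro := 120)
    (Fl := Gif.Frames.DGifSetupDecompress) henv.heap.inv henv.ctx henv.ok Gif.Frames.DGifSetupDecompress_ok rfl he_align hsame0
    (by omega) (Nat.le_refl _) (by omega) (by omega)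
  -- the prologue's own footprint, and the same in front of the contract's windows (`Body.same`)
  have hsame1 := prologue_same (top := (e.reg .rsp).toNat) (Fl := Gif.Frames.DGifSetupDecompress)
    Gif.Frames.DGifSetupDecompress_ok (ro := 120) (ro' := 56) rfl rfl he_align (by omega) (by omega) hsame0 []
  have hsame2 := prologue_same (top := (e.reg .rsp).toNat) (Fl := Gif.Frames.DGifSetupDecompress)
    Gif.Frames.DGifSetupDecompress_ok (ro := 120) (ro' := 56) rfl rfl he_align (by omega) (by omega) hsame0
    [⟨F.pv + 8, F.pv + 56⟩, ⟨F.pv + 88, F.pv + 89⟩, ⟨F.pv + 8536, F.pv + 24920⟩, ⟨F.gif + 96, F.gif + 100⟩,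
     ⟨R.cur, R.cur + 8⟩]
  have hin : ∀ s, s ∈ Gif.Frames.DGifSetupDecompress.prologue → s.idx + s.width ≤ 8 := by decide
  rw [← hmem] at hinv1 hok1 hrem1 hsame1 hsame2
  -- 5. THE EXIT ASSERTION: `Body` at 0x1061c8 …
  have hbody : DGifSetupDecompress.Body Gif.L.DGifSetupDecompress.at_1061c8 H rest frames F R u₀ e ret s_1061bd := {
    entry := he0
    pre := ⟨henv, hrdi⟩
    rip := w_rip
    rsp := w_rsp
    r13 := w_r13
    -- a slot is read THROUGH the shadow stores (`readLE_storesMem`), then in `M0`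
    slot_r15 := by
      rw [hmem, readLE_storesMem M0 _ 8 _ hin (by omega) _ _ (by u_omega)]
      exact k_r15
    slot_r14 := by
      rw [hmem, readLE_storesMem M0 _ 8 _ hin (by omega) _ _ (by u_omega)]
      exact k_r14
    slot_r13 := by
      rw [hmem, readLE_storesMem M0 _ 8 _ hin (by omega) _ _ (by u_omega)]
      exact k_r13
    slot_r12 := by
      rw [hmem, readLE_storesMem M0 _ 8 _ hin (by omega) _ _ (by u_omega)]
      exact k_r12
    slot_rbp := by
      rw [hmem, readLE_storesMem M0 _ 8 _ hin (by omega) _ _ (by u_omega)]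
      exact k_rbp
    slot_rbx := by
      rw [hmem, readLE_storesMem M0 _ 8 _ hin (by omega) _ _ (by u_omega)]
      exact k_rbx
    -- the return address: the prologue's footprint ends below its slot
    slot_ra := by
      rw [prologue_same_readLE hsame1 (e.reg .rsp) 8 (Nat.le_refl _) (by omega)]
      exact he_retAddr
    inv := hinv1
    ok := hok1
    rem := Nat.le_of_eq hrem1
    same := hsame2
    code := ProgX.Base.conv_code_in w_eq
    -- DF and MXCSR by hand (`v_inv` is slow behind a walk with shadow stores)
    abi := by
      refine ProgX.Base.abiInv_of ?_ ?_
      · rw [w_flags]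
        simp only [X86.User.df_setStatus]
        exact he_df
      · rw [w_mxcsr]
        exact he_mx
  }
  -- … and what only the first body segment may use: `rdi` and `rbx` hold gif, the reader is where it was
  refine ReachVia.done ?_
  exact {
    body := hbody
    rdi := w_kept.get .rdi rfl
    rbx := w_rbx
    remEq := hrem1
  }
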